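-- pv_equiv track=rewrite | github.com/miliar/Code_Jam_Webscraper | solutions_python/solutions_year16_round0_nr3/1164.py | convert
-- ===== SOURCE A (Python) =====
-- def convert(num, base):
--     res = 0
--     power = 1
--     while num:
--         if num % 2:
--             res += power
--         power *= base
--         num //= 2
--     return res
-- ===== SOURCE B (Python) =====
-- def convert(num, base):
--     res = 0
--     for ch in bin(num)[2:]:
--         res = res * base + int(ch)
--     return res
-- ===== Notes on version B (the rewrite author's own statement) =====
-- stated objective: idiomatic
-- what changed: Replaced the LSB-first loop maintaining a running power of base with Horner's method over the MSB-first binary string bin(num)[2:], keeping only a single accumulator multiplied by base each step.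
import Mathlib
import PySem

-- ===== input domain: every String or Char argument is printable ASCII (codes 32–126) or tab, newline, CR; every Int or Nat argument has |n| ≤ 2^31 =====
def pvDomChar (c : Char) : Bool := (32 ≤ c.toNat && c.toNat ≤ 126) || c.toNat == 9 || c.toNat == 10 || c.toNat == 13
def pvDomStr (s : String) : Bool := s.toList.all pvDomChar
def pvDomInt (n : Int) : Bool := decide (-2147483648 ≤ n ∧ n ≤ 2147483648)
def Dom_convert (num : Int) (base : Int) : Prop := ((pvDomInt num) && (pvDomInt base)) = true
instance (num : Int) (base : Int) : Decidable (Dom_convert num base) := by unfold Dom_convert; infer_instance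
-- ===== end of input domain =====

-- B replaces A's LSB-first power accumulation by Horner's method over the MSB-first binary digits (idiomatic).

-- ===== PORT A =====
-- while num: …  — for num < 0 the Python loop never terminates (num //= 2 sticks at -1);
-- those inputs are excluded by Pre_convert, and the guard `num ≤ 0` only makes the recursion total there.
def convertLoop (num res power base : Int) : Int :=
  if _h : num ≤ 0 then res
  else
    convertLoop (PySem.Int.floordiv num 2)
      (if PySem.Int.mod num 2 ≠ 0 then res + power else res)
      (power * base) base
termination_by num.toNat
decreasing_by
  have h2 : PySem.Int.floordiv num 2 = num / 2 := PySem.Int.floordiv_eq_ediv_of_pos (by omega)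
  omega

def convert (num : Int) (base : Int) : Int := convertLoop num 0 1 base

-- ===== PORT B =====
-- binGo n = the list of binary digits of n, most significant first (bin(n)[2:] for n > 0; [] for 0)
def binGo : Nat → List Int
  | 0 => []
  | n+1 => binGo ((n+1)/2) ++ [(((n+1) % 2 : Nat) : Int)]

-- bin(num)[2:] as digit list, then Horner: res = res*base + digit
def convert_alt (num : Int) (base : Int) : Int :=
  (if num = 0 then [(0:Int)] else binGo num.toNat).foldl (fun r b => r * base + b) 0

-- ===== PRECONDITION & SPEC =====
-- Pre_ excludes num < 0, on which the Python A loops forever (num //= 2 stabilises at -1, `while num` never exits).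
def Pre_convert (num : Int) (base : Int) : Prop := 0 ≤ num
instance (num : Int) (base : Int) : Decidable (Pre_convert num base) := by unfold Pre_convert; infer_instance
def pvWitness_convert : Int × Int := (13, 10)
def Spec_convert (num : Int) (base : Int) (out : Int) : Prop := out = convert_alt num base
instance (num : Int) (base : Int) (out : Int) : Decidable (Spec_convert num base out) := by unfold Spec_convert; infer_instance

-- ===== CLAIM (what is proved, stated in full; the proofs are below) =====
def Claim_equal_convert : Prop := ∀ (num : Int) (base : Int), Dom_convert num base → Pre_convert num base → Spec_convert num base (convert num base)

-- ===== LEMMAS AND PROOFS =====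

-- value of B's Horner fold on binGo n
def hornerV (base : Int) (n : Nat) : Int := (binGo n).foldl (fun r b => r * base + b) 0

theorem hornerV_succ (base : Int) (n : Nat) (h : 0 < n) :
    hornerV base n = hornerV base (n / 2) * base + (n % 2 : Nat) := by
  obtain ⟨m, rfl⟩ : ∃ m, n = m + 1 := ⟨n - 1, by omega⟩
  simp [hornerV, binGo, List.foldl_append]

theorem convertLoop_eq (base : Int) (n : Nat) : ∀ (res power : Int),
    convertLoop (n : Int) res power base = res + power * hornerV base n := by
  induction n using Nat.strong_induction_on with
  | _ n ih =>
    intro res power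
    rcases Nat.eq_zero_or_pos n with h0 | hp
    · subst h0; rw [convertLoop]; simp [hornerV, binGo]
    · rw [convertLoop]
      have hng : ¬ ((n : Int) ≤ 0) := by omega
      have hfd : PySem.Int.floordiv (n : Int) 2 = ((n / 2 : Nat) : Int) :=
        PySem.Int.floordiv_natCast n 2
      have hmd : PySem.Int.mod (n : Int) 2 = ((n % 2 : Nat) : Int) :=
        PySem.Int.mod_natCast n 2
      rw [dif_neg hng, hfd, hmd, ih (n / 2) (by omega)]
      rw [hornerV_succ base n hp]
      rcases Nat.mod_two_eq_zero_or_one n with he | he <;> simp [he] <;> ring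

theorem convert_alt_eq (num base : Int) (h : 0 ≤ num) :
    convert_alt num base = hornerV base num.toNat := by
  unfold convert_alt
  rcases eq_or_lt_of_le h with h0 | hp
  · simp [← h0, hornerV, binGo]
  · have : num ≠ 0 := by omega
    simp [this, hornerV]

-- ===== VERDICT (by name: the statement is the Claim_ definition above) =====
theorem convert_spec : Claim_equal_convert := by
  intro num base _ hpre
  unfold Spec_convert convert
  rw [convert_alt_eq num base hpre]
  have h : ((num.toNat : Nat) : Int) = num := Int.toNat_of_nonneg hpre
  rw [← h, convertLoop_eq]
  rw [h]
  simp [Int.toNat_of_nonneg hpre]
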